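-- pv_equiv track=rewrite | github.com/inaciovasquez2020/pachner-invariant | tests/test_pachner23_global_kernel_rank.py | theta_vector
-- ===== SOURCE A (Python) =====
-- def theta_vector(T, edge_index):
--     v = [0]*len(edge_index)
--     for t in T:
--         for i,e in enumerate(edge_index):
--             a,b = e
--             if a in t and b in t:
--                 v[i] += 1
--     return v
-- ===== SOURCE B (Python) =====
-- def theta_vector(T, edge_index):
--     # index every edge once: edge value -> list of its positions in edge_index
--     idx = {}
--     for i, e in enumerate(edge_index):
--         idx.setdefault(e, []).append(i)
--     # only vertices that occur as edge endpoints can ever matter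
--     verts = set()
--     for a, b in edge_index:
--         verts.add(a)
--         verts.add(b)
--     v = [0] * len(edge_index)
--     for t in T:
--         s = set(t) & verts
--         for x in s:
--             for y in s:
--                 for j in idx.get((x, y), []):
--                     v[j] += 1
--     return v
-- ===== Notes on version B (the rewrite author's own statement) =====
-- stated objective: faster
-- what changed: B builds a hash index edge->positions and the set of vertices occurring in edges once, then per simplex enumerates ordered pairs of the simplex's edge-supported distinct vertices and bumps only the matching positions, instead of scanning the whole edge list with list-membership tests for every simplex.
import Mathlib
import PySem

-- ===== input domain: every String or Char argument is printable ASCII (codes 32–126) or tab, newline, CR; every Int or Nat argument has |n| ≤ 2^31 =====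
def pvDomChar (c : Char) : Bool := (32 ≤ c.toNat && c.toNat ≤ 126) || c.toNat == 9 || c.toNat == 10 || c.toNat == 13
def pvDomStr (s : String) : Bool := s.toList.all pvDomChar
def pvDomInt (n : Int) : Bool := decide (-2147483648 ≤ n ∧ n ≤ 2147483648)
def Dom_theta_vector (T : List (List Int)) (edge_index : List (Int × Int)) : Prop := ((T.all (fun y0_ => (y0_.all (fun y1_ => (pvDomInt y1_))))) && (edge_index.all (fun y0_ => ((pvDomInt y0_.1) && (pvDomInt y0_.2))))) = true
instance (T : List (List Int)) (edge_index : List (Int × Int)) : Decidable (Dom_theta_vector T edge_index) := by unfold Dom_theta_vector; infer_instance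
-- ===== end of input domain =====

-- B builds a hash index edge->positions once and, per simplex, bumps only the edges among
-- the ordered pairs of the simplex's distinct vertices, instead of scanning every edge for
-- every simplex (objective: faster).

-- ===== PORT A =====
def theta_vector (T : List (List Int)) (edge_index : List (Int × Int)) : List Int :=
  T.foldl (fun v t =>
    (PySem.List.enumerate edge_index 0).foldl (fun v ie =>
      if ie.2.1 ∈ t ∧ ie.2.2 ∈ t then
        PySem.List.pySetD v ie.1 (PySem.List.pyGetD v ie.1 0 + 1)
      else v) v)
    (List.replicate edge_index.length 0)

-- ===== PORT B =====
def theta_vector_alt (T : List (List Int)) (edge_index : List (Int × Int)) : List Int :=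
  let idx : PySem.Dict (Int × Int) (List Int) :=
    (PySem.List.enumerate edge_index 0).foldl
      (fun d ie => d.modify ie.2 [] (· ++ [ie.1])) PySem.Dict.empty
  let verts : PySem.Set Int :=
    edge_index.foldl (fun s e => (s.add e.1).add e.2) PySem.Set.empty
  T.foldl (fun v t =>
    let s : PySem.Set Int := PySem.Set.inter (PySem.Set.ofList t) verts
    s.foldl (fun v x =>
      s.foldl (fun v y =>
        (idx.getD (x, y) []).foldl (fun v j =>
          PySem.List.pySetD v j (PySem.List.pyGetD v j 0 + 1)) v) v) v)
    (List.replicate edge_index.length 0)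

-- ===== PRECONDITION & SPEC =====
def Spec_theta_vector (T : List (List Int)) (edge_index : List (Int × Int)) (out : List Int) : Prop := out = theta_vector_alt T edge_index
instance (T : List (List Int)) (edge_index : List (Int × Int)) (out : List Int) : Decidable (Spec_theta_vector T edge_index out) := by unfold Spec_theta_vector; infer_instance

-- ===== CLAIM (what is proved, stated in full; the proofs are below) =====
def Claim_equal_theta_vector : Prop := ∀ (T : List (List Int)) (edge_index : List (Int × Int)), Dom_theta_vector T edge_index → Spec_theta_vector T edge_index (theta_vector T edge_index)

-- ===== LEMMAS AND PROOFS =====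

-- "bump every index in L by one": the common inner-loop shape of both ports
def pvBump (L : List Int) (v : List Int) : List Int :=
  L.foldl (fun v j => PySem.List.pySetD v j (PySem.List.pyGetD v j 0 + 1)) v

-- the list of positions of edge p in edge_index (what B's dict stores under p)
def pvIdxList (E : List (Int × Int)) (q : (Int × Int) → Bool) : List Int :=
  ((PySem.List.enumerate E 0).filter (fun ie => q ie.2)).map (·.1)

lemma pvBump_length (L v : List Int) : (pvBump L v).length = v.length := by
  induction L generalizing v with
  | nil => rfl
  | cons j L ih =>
      rw [pvBump, List.foldl_cons, ← pvBump, ih]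
      simp [pysem]

lemma pvBump_getD (L : List Int) (v : List Int) (j : Nat) (hj : j < v.length)
    (hL : ∀ x ∈ L, 0 ≤ x ∧ x < (v.length : Int)) :
    PySem.List.pyGetD (pvBump L v) (j : Int) 0
      = PySem.List.pyGetD v (j : Int) 0 + (L.count (j : Int) : Int) := by
  induction L generalizing v with
  | nil => simp [pvBump]
  | cons x L ih =>
      obtain ⟨hx0, hxl⟩ := hL x (by simp)
      have hset : PySem.List.pySetD v x (PySem.List.pyGetD v x 0 + 1)
          = v.set x.toNat (PySem.List.pyGetD v x 0 + 1) :=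
        PySem.List.pySetD_of_nonneg v _ hx0
      have hlen : (PySem.List.pySetD v x (PySem.List.pyGetD v x 0 + 1)).length = v.length := by
        rw [hset]; simp
      rw [pvBump, List.foldl_cons, ← pvBump]
      rw [ih _ (by omega) (fun y hy => by
        have := hL y (by simp [hy]); omega)]
      have hcast : x = ((x.toNat : Nat) : Int) := by omega
      rw [List.count_cons]
      by_cases hje : (j : Int) = x
      · have hjx : j = x.toNat := by omega
        rw [hcast, PySem.List.pyGetD_pySetD_natCast _ _ _ _ _ (by omega)]
        simp [hjx]
        ring
      · rw [hcast, PySem.List.pyGetD_pySetD_natCast _ _ _ _ _ (by omega)]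
        have hne : ¬ (j = x.toNat) := by omega
        have hne2 : ¬ (max x 0 = (j : Int)) := by omega
        simp [hne, hne2]

-- a fold of bumps is one bump of the concatenation
lemma pvBump_flatMap {α : Type} (l : List α) (g : α → List Int) (v : List Int) :
    l.foldl (fun v x => pvBump (g x) v) v = pvBump (l.flatMap g) v := by
  induction l generalizing v with
  | nil => simp [pvBump]
  | cons x l ih => simp only [List.flatMap_cons, List.foldl_cons, pvBump, List.foldl_append] at *; rw [ih]

-- A's inner loop over enumerate(edge_index) is one bump of the matching positions
lemma stepA_eq_bump (E : List (Int × Int)) (t : List Int) (v : List Int) :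
    (PySem.List.enumerate E 0).foldl (fun v ie =>
        if ie.2.1 ∈ t ∧ ie.2.2 ∈ t then
          PySem.List.pySetD v ie.1 (PySem.List.pyGetD v ie.1 0 + 1)
        else v) v
      = pvBump (pvIdxList E (fun e => decide (e.1 ∈ t ∧ e.2 ∈ t))) v := by
  rw [PySem.List.foldl_ite_eq_foldl_filter]
  rw [pvIdxList, pvBump, List.foldl_map]

-- what B's dict lookup returns: the positions of p in edge_index, in order
lemma idx_getD (es : List (Int × Int)) (s : Int)
    (d : PySem.Dict (Int × Int) (List Int)) (p : Int × Int) :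
    (((PySem.List.enumerate es s).foldl
        (fun d ie => d.modify ie.2 [] (· ++ [ie.1])) d)).getD p []
      = d.getD p [] ++ (((PySem.List.enumerate es s).filter (fun ie => ie.2 == p)).map (·.1)) := by
  induction es generalizing s d with
  | nil => simp [PySem.List.enumerate_nil]
  | cons e es ih =>
      rw [PySem.List.enumerate_cons, List.foldl_cons, ih, List.filter_cons]
      by_cases hep : e = p
      · subst hep
        simp [PySem.Dict.getD_modify_self]
      · have : (e == p) = false := by simp [hep]
        simp [this, PySem.Dict.getD_modify_of_ne _ _ _ (Ne.symm hep)]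

-- membership in the positions list
lemma mem_pvIdxList (E : List (Int × Int)) (q : (Int × Int) → Bool) (j : Int) :
    j ∈ pvIdxList E q ↔ ∃ (k : Nat) (h : k < E.length), j = (k : Int) ∧ q E[k] := by
  simp only [pvIdxList, List.mem_map, List.mem_filter, PySem.List.mem_enumerate_iff]
  constructor
  · rintro ⟨⟨i, e⟩, ⟨⟨k, hk, hke⟩, hq⟩, hj⟩
    simp at hke
    exact ⟨k, hk, by simp [← hj, hke.1], by rw [← hke.2]; exact hq⟩
  · rintro ⟨k, hk, hj, hq⟩
    exact ⟨((k : Int), E[k]), ⟨⟨k, hk, by simp⟩, hq⟩, hj.symm⟩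

lemma nodup_pvIdxList (E : List (Int × Int)) (q : (Int × Int) → Bool) :
    (pvIdxList E q).Nodup := by
  have hp := PySem.List.pairwise_lt_enumerate E 0
  exact (hp.filter (fun ie => q ie.2)).map (fun (p : Int × (Int × Int)) => p.1)
    (fun (a b : Int × (Int × Int)) (h : a.1 < b.1) => (by omega : a.1 ≠ b.1))

lemma count_pvIdxList (E : List (Int × Int)) (q : (Int × Int) → Bool)
    (j : Nat) (hj : j < E.length) :
    (pvIdxList E q).count (j : Int) = if q E[j] then 1 else 0 := by
  rw [(nodup_pvIdxList E q).count]
  by_cases h : q E[j]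
  · simp [h, (mem_pvIdxList E q (j : Int)).2 ⟨j, hj, rfl, h⟩]
  · have : ¬ ((j : Int) ∈ pvIdxList E q) := by
      rw [mem_pvIdxList]
      rintro ⟨k, hk, hjk, hq⟩
      have : k = j := by omega
      subst this; exact h hq
    simp [h, this]

lemma range_pvIdxList (E : List (Int × Int)) (q : (Int × Int) → Bool)
    (x : Int) (hx : x ∈ pvIdxList E q) : 0 ≤ x ∧ x < (E.length : Int) := by
  obtain ⟨k, hk, hjk, -⟩ := (mem_pvIdxList E q x).1 hx
  omega

-- sum of a 0/1 indicator over a duplicate-free list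
lemma sum_ite_nodup (s : List Int) (hs : s.Nodup) (a : Int) (c : Nat) :
    (s.map (fun x => if x = a then c else 0)).sum = if a ∈ s then c else 0 := by
  induction s with
  | nil => simp
  | cons x s ih =>
      rw [List.map_cons, List.sum_cons, ih (List.nodup_cons.mp hs).2]
      have hxs : x ∉ s := (List.nodup_cons.mp hs).1
      by_cases hxa : x = a
      · subst hxa
        simp [hxs]
      · simp [hxa, List.mem_cons, Ne.symm hxa]

lemma count_flatMap_int {α : Type} (l : List α) (g : α → List Int) (a : Int) :
    ((l.flatMap g).count a) = (l.map (fun x => (g x).count a)).sum := by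
  induction l with
  | nil => simp
  | cons x l ih => simp [List.flatMap_cons, List.count_append, ih]

-- the count of position j over B's pair enumeration for one simplex
lemma count_LB (E : List (Int × Int)) (j : Nat) (hj : j < E.length) (s : List Int)
    (hs : s.Nodup) :
    ((s.flatMap (fun x => s.flatMap (fun y => pvIdxList E (· == (x, y))))).count (j : Int))
      = if E[j].1 ∈ s ∧ E[j].2 ∈ s then 1 else 0 := by
  rw [count_flatMap_int]
  have hinner : ∀ x : Int,
      ((s.flatMap (fun y => pvIdxList E (· == (x, y)))).count (j : Int))
        = if x = E[j].1 then (if E[j].2 ∈ s then 1 else 0) else 0 := by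
    intro x
    rw [count_flatMap_int]
    have : ∀ y : Int, (pvIdxList E (· == (x, y))).count (j : Int)
        = if x = E[j].1 then (if y = E[j].2 then 1 else 0) else 0 := by
      intro y
      rw [count_pvIdxList E _ j hj]
      by_cases h1 : x = E[j].1 <;> by_cases h2 : y = E[j].2 <;>
        simp [Prod.ext_iff, h1, h2] <;> omega
    simp only [this]
    by_cases h1 : x = E[j].1
    · simp only [h1, if_pos]
      have := sum_ite_nodup s hs E[j].2 1
      simpa using this
    · simp [h1]
  simp only [hinner]
  have := sum_ite_nodup s hs E[j].1 (if E[j].2 ∈ s then 1 else 0)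
  rw [this]
  by_cases ha : E[j].1 ∈ s <;> by_cases hb : E[j].2 ∈ s <;> simp [ha, hb]

lemma range_LB (E : List (Int × Int)) (s : List Int) (x : Int)
    (hx : x ∈ s.flatMap (fun a => s.flatMap (fun b => pvIdxList E (· == (a, b))))) :
    0 ≤ x ∧ x < (E.length : Int) := by
  simp only [List.mem_flatMap] at hx
  obtain ⟨a, -, b, -, hm⟩ := hx
  exact range_pvIdxList E _ x hm

-- any edge (a, b) of edge_index has both endpoints in the vertex-support set
lemma verts_mono (E : List (Int × Int)) (s : PySem.Set Int) (x : Int) (hx : x ∈ s) :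
    x ∈ E.foldl (fun s e => (s.add e.1).add e.2) s := by
  induction E generalizing s with
  | nil => exact hx
  | cons e E ih =>
      exact ih _ (((PySem.Set.mem_add _ _ _).2 (Or.inl ((PySem.Set.mem_add _ _ _).2 (Or.inl hx)))))

lemma mem_verts_of_mem (E : List (Int × Int)) (s0 : PySem.Set Int) (e : Int × Int)
    (he : e ∈ E) :
    e.1 ∈ E.foldl (fun s e => (s.add e.1).add e.2) s0
    ∧ e.2 ∈ E.foldl (fun s e => (s.add e.1).add e.2) s0 := by
  induction E generalizing s0 with
  | nil => cases he
  | cons f E ih =>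
      rw [List.foldl_cons]
      rcases List.mem_cons.mp he with h | h
      · subst h
        exact ⟨verts_mono E _ _ ((PySem.Set.mem_add _ _ _).2
            (Or.inl ((PySem.Set.mem_add _ _ _).2 (Or.inr rfl)))),
          verts_mono E _ _ ((PySem.Set.mem_add _ _ _).2 (Or.inr rfl))⟩
      · exact ih _ h

-- the two per-simplex steps agree on vectors of the right length, for any
-- duplicate-free vertex list s that captures membership in t on edge endpoints
lemma step_eq (E : List (Int × Int)) (t : List Int) (s : List Int) (hs : s.Nodup)
    (hiff : ∀ (j : Nat) (hj : j < E.length),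
      (E[j].1 ∈ s ∧ E[j].2 ∈ s) ↔ (E[j].1 ∈ t ∧ E[j].2 ∈ t))
    (v : List Int) (hv : v.length = E.length) :
    pvBump (pvIdxList E (fun e => decide (e.1 ∈ t ∧ e.2 ∈ t))) v
      = pvBump (s.flatMap (fun x => s.flatMap (fun y => pvIdxList E (· == (x, y))))) v := by
  apply List.ext_getElem
  · rw [pvBump_length, pvBump_length]
  · intro j hj1 hj2
    have hjv : j < v.length := by
      have := hj1; rwa [pvBump_length] at this
    have hjE : j < E.length := by omega
    have g1 : ∀ (L w : List Int), (hw : j < (pvBump L w).length) → (pvBump L w)[j] = PySem.List.pyGetD (pvBump L w) (j : Int) 0 := by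
      intro L w hw
      simp [pysem, hw]
    rw [g1 _ _ hj1, g1 _ _ hj2]
    rw [pvBump_getD _ _ j hjv (by
        intro x hx
        have := range_pvIdxList E _ x hx
        omega),
      pvBump_getD _ _ j hjv (by
        intro x hx
        have := range_LB E _ x hx
        omega)]
    congr 1
    rw [count_pvIdxList E _ j hjE, count_LB E j hjE _ hs]
    by_cases h : E[j].1 ∈ t ∧ E[j].2 ∈ t
    · simp [h, (hiff j hjE).2 h]
    · have h2 : ¬ (E[j].1 ∈ s ∧ E[j].2 ∈ s) := fun hc => h ((hiff j hjE).1 hc)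
      simp [h, h2]

-- ===== VERDICT (by name: the statement is the Claim_ definition above) =====
theorem theta_vector_spec : Claim_equal_theta_vector := by
  intro T E hdom
  clear hdom
  unfold Spec_theta_vector theta_vector theta_vector_alt
  simp only [idx_getD, PySem.Dict.getD_empty, List.nil_append]
  set verts : PySem.Set Int :=
    E.foldl (fun s e => (s.add e.1).add e.2) PySem.Set.empty with hverts
  have main : ∀ (v : List Int), v.length = E.length →
      T.foldl (fun v t =>
        (PySem.List.enumerate E 0).foldl (fun v ie =>
          if ie.2.1 ∈ t ∧ ie.2.2 ∈ t then
            PySem.List.pySetD v ie.1 (PySem.List.pyGetD v ie.1 0 + 1)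
          else v) v) v
      = T.foldl (fun v t =>
          (PySem.Set.inter (PySem.Set.ofList t) verts).foldl (fun v x =>
            (PySem.Set.inter (PySem.Set.ofList t) verts).foldl (fun v y =>
              (((PySem.List.enumerate E 0).filter (fun ie => ie.2 == (x, y))).map (·.1)).foldl
                (fun v j => PySem.List.pySetD v j (PySem.List.pyGetD v j 0 + 1)) v) v) v) v := by
    induction T with
    | nil => intro v _; rfl
    | cons t T ih =>
        intro v hv
        rw [List.foldl_cons, List.foldl_cons]
        set s : PySem.Set Int := PySem.Set.inter (PySem.Set.ofList t) verts with hsdef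
        have hstepB : s.foldl (fun v x =>
            s.foldl (fun v y =>
              (((PySem.List.enumerate E 0).filter (fun ie => ie.2 == (x, y))).map (·.1)).foldl
                (fun v j => PySem.List.pySetD v j (PySem.List.pyGetD v j 0 + 1)) v) v) v
            = pvBump (s.flatMap
                (fun x => s.flatMap (fun y => pvIdxList E (· == (x, y))))) v := by
          rw [← pvBump_flatMap]
          apply PySem.List.foldl_congr_mem
          intro acc x _
          rw [← pvBump_flatMap]
          rfl
        have hsnodup : s.Nodup := by
          rw [hsdef]
          exact List.Nodup.filter _ (PySem.Set.nodup_ofList t)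
        have hiff : ∀ (j : Nat) (hj : j < E.length),
            (E[j].1 ∈ s ∧ E[j].2 ∈ s) ↔ (E[j].1 ∈ t ∧ E[j].2 ∈ t) := by
          intro j hj
          rw [hsdef]
          rw [PySem.Set.mem_inter, PySem.Set.mem_inter, PySem.Set.mem_ofList, PySem.Set.mem_ofList]
          have hv2 := mem_verts_of_mem E PySem.Set.empty E[j] (List.getElem_mem hj)
          rw [← hverts] at hv2
          constructor
          · rintro ⟨⟨h1, -⟩, ⟨h2, -⟩⟩; exact ⟨h1, h2⟩
          · rintro ⟨h1, h2⟩; exact ⟨⟨h1, hv2.1⟩, ⟨h2, hv2.2⟩⟩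
        rw [stepA_eq_bump, step_eq E t s hsnodup hiff v hv, ← hstepB]
        apply ih
        rw [hstepB, pvBump_length, hv]
  exact main (List.replicate E.length 0) (by simp)
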